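-- pv_equiv track=rewrite | github.com/eshun4/CodingPrepAdvanced | Multi-dimensional arrays/02/bookshelf_traversal.py | bookshelfTraversal
-- ===== SOURCE A (Python) =====
-- def bookshelfTraversal(bookshelves):
--     rows, cols = len(bookshelves), len(bookshelves[0])
--     traversal_path = []
--
--     for col in range(cols - 1, -1, -1):
--         if col % 2 == 0:  # Even-indexed columns (from the right), traverse from top to bottom
--             for row in range(rows):
--                 traversal_path.append(bookshelves[row][col])
--         else:  # Odd-indexed columns, traverse from bottom to top
--             for row in range(rows - 1, -1, -1):
--                 traversal_path.append(bookshelves[row][col])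
--
--     return traversal_path
-- ===== SOURCE B (Python) =====
-- def bookshelfTraversal(bookshelves):
--     rows, cols = len(bookshelves), len(bookshelves[0])
--     buckets = [[] for _ in range(cols)]
--     for row in bookshelves:
--         for c in range(cols):
--             if c % 2 == 0:
--                 buckets[c].append(row[c])
--             else:
--                 buckets[c].insert(0, row[c])
--     result = []
--     for bucket in buckets[::-1]:
--         result += bucket
--     return result
-- ===== Notes on version B (the rewrite author's own statement) =====
-- stated objective: alternative
-- what changed: Replaces A's column-major double loop with direct per-cell indexing by a single row-major pass that distributes each cell into per-column buckets (append for even columns, prepend for odd ones) and then concatenates the buckets right-to-left.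
import Mathlib
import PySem

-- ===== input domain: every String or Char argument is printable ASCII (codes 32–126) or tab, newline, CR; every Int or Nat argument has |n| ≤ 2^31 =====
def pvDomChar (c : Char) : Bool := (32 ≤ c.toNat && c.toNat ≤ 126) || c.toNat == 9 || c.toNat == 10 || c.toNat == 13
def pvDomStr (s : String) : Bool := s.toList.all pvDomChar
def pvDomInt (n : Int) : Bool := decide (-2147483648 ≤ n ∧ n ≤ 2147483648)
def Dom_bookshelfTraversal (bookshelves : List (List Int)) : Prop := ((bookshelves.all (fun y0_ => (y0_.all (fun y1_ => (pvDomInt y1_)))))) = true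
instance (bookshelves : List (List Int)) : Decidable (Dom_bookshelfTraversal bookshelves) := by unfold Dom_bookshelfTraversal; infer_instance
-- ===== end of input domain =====

-- B replaces A's column-major double indexing by ONE row-major pass that distributes each
-- cell into per-column buckets (append for even columns, prepend for odd ones), then
-- concatenates the buckets right-to-left (objective: alternative, same O(rows*cols) cells touched).

-- ===== PORT A =====
def bookshelfTraversal (bookshelves : List (List Int)) : List Int :=
  let rows : Int := bookshelves.length
  let cols : Int := (PySem.List.pyGetD bookshelves 0 []).length
  (PySem.List.pyRange (cols - 1) (-1) (-1)).foldl (fun acc col =>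
    if PySem.Int.mod col 2 = 0 then
      (PySem.List.pyRange 0 rows 1).foldl
        (fun acc row => acc ++ [PySem.List.pyGetD (PySem.List.pyGetD bookshelves row []) col 0]) acc
    else
      (PySem.List.pyRange (rows - 1) (-1) (-1)).foldl
        (fun acc row => acc ++ [PySem.List.pyGetD (PySem.List.pyGetD bookshelves row []) col 0]) acc) []

-- ===== PORT B =====
-- one row-major pass: each cell row[c] goes into bucket c (appended for even c,
-- prepended for odd c — Python's buckets[c].insert(0, x)); then flatten buckets[::-1]
def bookshelfTraversal_alt (bookshelves : List (List Int)) : List Int :=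
  let _rows : Int := bookshelves.length
  let cols : Int := (PySem.List.pyGetD bookshelves 0 []).length
  let buckets : List (List Int) := (PySem.List.pyRange 0 cols 1).map (fun _ => ([] : List Int))
  let buckets := bookshelves.foldl (fun bks row =>
    (PySem.List.pyRange 0 cols 1).foldl (fun bks c =>
      if PySem.Int.mod c 2 = 0 then
        bks.modify c.toNat (fun b => b ++ [PySem.List.pyGetD row c 0])
      else
        bks.modify c.toNat (fun b => PySem.List.pyGetD row c 0 :: b)) bks) buckets
  ((PySem.List.slice? buckets none none (-1)).getD []).foldl
    (fun result bucket => result ++ bucket) []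

-- ===== PRECONDITION & SPEC =====
-- Pre_ = exactly the inputs where the Python A returns (it raises IndexError on an empty
-- grid and on grids with some row shorter than the first row; B raises there too).
def Pre_bookshelfTraversal (bookshelves : List (List Int)) : Prop :=
  bookshelves ≠ [] ∧ ∀ r ∈ bookshelves, (bookshelves.headD []).length ≤ r.length
instance (bookshelves : List (List Int)) : Decidable (Pre_bookshelfTraversal bookshelves) := by unfold Pre_bookshelfTraversal; infer_instance
def pvWitness_bookshelfTraversal : List (List Int) := [[1, 2], [3, 4]]

def Spec_bookshelfTraversal (bookshelves : List (List Int)) (out : List Int) : Prop := out = bookshelfTraversal_alt bookshelves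
instance (bookshelves : List (List Int)) (out : List Int) : Decidable (Spec_bookshelfTraversal bookshelves out) := by unfold Spec_bookshelfTraversal; infer_instance

-- ===== CLAIM (what is proved, stated in full; the proofs are below) =====
def Claim_equal_bookshelfTraversal : Prop := ∀ (bookshelves : List (List Int)), Dom_bookshelfTraversal bookshelves → Pre_bookshelfTraversal bookshelves → Spec_bookshelfTraversal bookshelves (bookshelfTraversal bookshelves)

-- ===== LEMMAS AND PROOFS =====

-- column k of the grid, top to bottom (with getD defaults, as both ports read cells)
def pvCol (k : Nat) (bs : List (List Int)) : List Int := bs.map (fun r => r.getD k 0)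

-- the bucket contents after distributing the rows of bs
def pvTarget (n : Nat) (bs : List (List Int)) : List (List Int) :=
  (List.range n).map (fun k => if k % 2 = 0 then pvCol k bs else (pvCol k bs).reverse)

-- what one row does to bucket k (B's branch, on the Nat side)
def pvUpd (row : List Int) (k : Nat) (b : List Int) : List Int :=
  if k % 2 = 0 then b ++ [row.getD k 0] else row.getD k 0 :: b

-- a fold over range(0, m) that modifies bucket c at step c, characterised by getElem?
theorem pvFoldModify (g : Nat → List Int → List Int) :
    ∀ (m : Nat) (B : List (List Int)) (j : Nat),
      ((PySem.List.pyRange 0 (m : Int) 1).foldl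
          (fun bks c => bks.modify c.toNat (g c.toNat)) B)[j]?
        = if j < m then (B[j]?).map (g j) else B[j]? := by
  intro m
  induction m with
  | zero =>
    intro B j
    simp [PySem.List.pyRange_one_eq_nil]
  | succ m ih =>
    intro B j
    have hcast : ((m + 1 : Nat) : Int) = (m : Int) + 1 := by push_cast; ring
    rw [hcast, PySem.List.pyRange_one_succ_right (by positivity), List.foldl_append]
    simp only [List.foldl_cons, List.foldl_nil, Int.toNat_natCast]
    rw [List.getElem?_modify, ih B j]
    by_cases h1 : j < m
    · rw [if_pos h1, if_pos (by omega : j < m + 1)]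
      cases B[j]? with
      | none => rfl
      | some b => simp [show ¬ m = j from by omega]
    · by_cases h2 : m = j
      · subst h2
        rw [if_neg (by omega : ¬ m < m), if_pos (by omega : m < m + 1)]
        cases B[m]? <;> simp
      · rw [if_neg h1, if_neg (by omega : ¬ j < m + 1)]
        cases B[j]? <;> simp [h2]

-- the inner per-row fold of port B, with the branch pushed inside the modify
theorem pvStepRow (n : Nat) (row : List Int) (B : List (List Int)) :
    (PySem.List.pyRange 0 (n : Int) 1).foldl (fun bks c =>
        if PySem.Int.mod c 2 = 0 then
          bks.modify c.toNat (fun b => b ++ [PySem.List.pyGetD row c 0])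
        else
          bks.modify c.toNat (fun b => PySem.List.pyGetD row c 0 :: b)) B
      = (PySem.List.pyRange 0 (n : Int) 1).foldl (fun bks c =>
          bks.modify c.toNat (pvUpd row c.toNat)) B := by
  apply PySem.List.foldl_congr_mem
  intro bks c hc
  have hcr := (PySem.List.mem_pyRange_one).mp hc
  have hck : c = ((c.toNat : Nat) : Int) := by omega
  have hmod : PySem.Int.mod c 2 = ((c.toNat % 2 : Nat) : Int) := by
    rw [hck]; exact_mod_cast PySem.Int.mod_natCast c.toNat 2
  by_cases h : c.toNat % 2 = 0
  · rw [if_pos (by rw [hmod, h]; rfl)]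
    congr 1; funext b
    rw [pvUpd, if_pos h, hck, PySem.List.pyGetD_natCast, Int.toNat_natCast]
  · rw [if_neg (by rw [hmod]; exact_mod_cast h)]
    congr 1; funext b
    rw [pvUpd, if_neg h, hck, PySem.List.pyGetD_natCast, Int.toNat_natCast]

-- one row moves the target forward by one processed row
theorem pvStepRow_target (n : Nat) (row : List Int) (P : List (List Int)) :
    (PySem.List.pyRange 0 (n : Int) 1).foldl (fun bks c =>
        if PySem.Int.mod c 2 = 0 then
          bks.modify c.toNat (fun b => b ++ [PySem.List.pyGetD row c 0])
        else
          bks.modify c.toNat (fun b => PySem.List.pyGetD row c 0 :: b)) (pvTarget n P)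
      = pvTarget n (P ++ [row]) := by
  rw [pvStepRow]
  apply List.ext_getElem?
  intro j
  rw [pvFoldModify (pvUpd row) n (pvTarget n P) j]
  have hcol : pvCol j (P ++ [row]) = pvCol j P ++ [row.getD j 0] := by simp [pvCol]
  by_cases hj : j < n
  · rw [if_pos hj]
    simp only [pvTarget, List.getElem?_map, List.getElem?_range, hj]
    simp only [Option.map_some]
    congr 1
    by_cases h : j % 2 = 0 <;> simp [pvUpd, h, hcol]
  · rw [if_neg hj]
    simp [pvTarget, hj]

-- after all rows, the buckets are exactly pvTarget n bs
theorem pvBuckets_eq (n : Nat) (bs : List (List Int)) :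
    ∀ (P : List (List Int)),
      bs.foldl (fun bks row =>
        (PySem.List.pyRange 0 (n : Int) 1).foldl (fun bks c =>
          if PySem.Int.mod c 2 = 0 then
            bks.modify c.toNat (fun b => b ++ [PySem.List.pyGetD row c 0])
          else
            bks.modify c.toNat (fun b => PySem.List.pyGetD row c 0 :: b)) bks) (pvTarget n P)
      = pvTarget n (P ++ bs) := by
  induction bs with
  | nil => intro P; simp
  | cons r rest ih =>
    intro P
    simp only [List.foldl_cons]
    rw [pvStepRow_target, ih (P ++ [r]), List.append_assoc]
    rfl

-- the initial bucket list [[] for _ in range(n)] is pvTarget n []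
theorem pvInit_eq (n : Nat) :
    (PySem.List.pyRange 0 (n : Int) 1).map (fun _ => ([] : List Int)) = pvTarget n [] := by
  rw [PySem.List.pyRange_one]
  simp [pvTarget, pvCol, List.map_map, Function.comp_def, List.map_const']

-- flattening fold
theorem pvFoldFlatten (l : List (List Int)) (acc : List Int) :
    l.foldl (fun result bucket => result ++ bucket) acc = acc ++ l.flatten := by
  induction l generalizing acc with
  | nil => simp
  | cons b rest ih => simp [ih]

theorem bookshelfTraversal_spec : Claim_equal_bookshelfTraversal := by
  intro bs _ hpre
  show bookshelfTraversal bs = bookshelfTraversal_alt bs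
  unfold bookshelfTraversal bookshelfTraversal_alt
  simp only []
  set n := (PySem.List.pyGetD bs 0 ([] : List Int)).length with hn
  -- B side: buckets = pvTarget n bs, then flatten of the reversed bucket list
  rw [pvInit_eq n, pvBuckets_eq n bs [], List.nil_append,
    PySem.List.slice?_none_none_neg_one, Option.getD_some, pvFoldFlatten, List.nil_append]
  -- A side: replace each column's inner fold by appending the column (or its reverse)
  rw [PySem.List.foldl_congr_mem _ _
    (fun (acc : List Int) (col : Int) => acc ++
      (if col.toNat % 2 = 0 then pvCol col.toNat bs else (pvCol col.toNat bs).reverse)) []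
    ?_]
  · -- now a pure append-fold: flatMap over the countdown range = flatten of the reversed target
    rw [PySem.List.foldl_append_eq_flatMap, List.nil_append,
      show PySem.List.pyRange ((n : Int) - 1) (-1) (-1) = (PySem.List.pyRange 0 (n : Int) 1).reverse by
        have := PySem.List.pyRange_neg_one_eq_reverse ((n : Int) - 1) (-1)
        simpa using this]
    rw [List.flatMap_def, List.map_reverse]
    have hmapE : (PySem.List.pyRange 0 (n : Int) 1).map
        (fun col : Int => if col.toNat % 2 = 0 then pvCol col.toNat bs
          else (pvCol col.toNat bs).reverse) = pvTarget n bs := by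
      rw [PySem.List.pyRange_zero_nat, List.map_map]
      unfold pvTarget
      exact List.map_congr_left fun k _ => by simp [Function.comp]
    rw [hmapE]
  · intro acc col hcol
    show _ = acc ++ (if col.toNat % 2 = 0 then pvCol col.toNat bs else (pvCol col.toNat bs).reverse)
    have hcr : -1 < col ∧ col ≤ (n : Int) - 1 := (PySem.List.mem_pyRange_neg_one).mp hcol
    have h0 : 0 ≤ col := by omega
    have hck : col = ((col.toNat : Nat) : Int) := by omega
    have hmod : PySem.Int.mod col 2 = ((col.toNat % 2 : Nat) : Int) := by
      rw [hck]; exact_mod_cast PySem.Int.mod_natCast col.toNat 2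
    have hcell : ∀ r ∈ bs, PySem.List.pyGetD r col 0 = r.getD col.toNat 0 := by
      intro r _
      rw [hck, PySem.List.pyGetD_natCast, Int.toNat_natCast]
    have hinner :
        (PySem.List.pyRange 0 (bs.length : Int) 1).map
          (fun row => PySem.List.pyGetD (PySem.List.pyGetD bs row []) col 0)
          = pvCol col.toNat bs := by
      have hmm : (PySem.List.pyRange 0 (bs.length : Int) 1).map
          (fun row => PySem.List.pyGetD (PySem.List.pyGetD bs row []) col 0)
          = ((PySem.List.pyRange 0 (bs.length : Int) 1).map
              (fun row => PySem.List.pyGetD bs row [])).map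
            (fun r => PySem.List.pyGetD r col 0) := by
        simp [List.map_map, Function.comp]
      rw [hmm, PySem.List.map_pyGetD_pyRange_zero']
      exact List.map_congr_left hcell
    by_cases hpar : col.toNat % 2 = 0
    · rw [if_pos (by rw [hmod, hpar]; rfl), if_pos hpar,
        PySem.List.foldl_append_singleton_eq_map, hinner]
    · rw [if_neg (by rw [hmod]; exact_mod_cast hpar), if_neg hpar,
        PySem.List.foldl_append_singleton_eq_map,
        show PySem.List.pyRange ((bs.length : Int) - 1) (-1) (-1)
            = (PySem.List.pyRange 0 (bs.length : Int) 1).reverse by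
          have := PySem.List.pyRange_neg_one_eq_reverse ((bs.length : Int) - 1) (-1)
          simpa using this,
        List.map_reverse, hinner]
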